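-- pv_equiv track=rewrite | github.com/BhallaLab/moose | moose-core/python/moose/SBML/readSBML.py | convertSpecialChar
-- ===== SOURCE A (Python) =====
-- def convertSpecialChar(str1):
--     d = {"&": "_and", "<": "_lessthan_", ">": "_greaterthan_", "BEL": "&#176", "-": "_minus_", "'": "_prime_",
--          "+": "_plus_", "*": "_star_", "/": "_slash_", "(": "_bo_", ")": "_bc_",
--          "[": "_sbo_", "]": "_sbc_", " ": "_"
--          }
--     for i, j in list(d.items()):
--         str1 = str1.replace(i, j)
--     return str1
-- ===== SOURCE B (Python) =====
-- def convertSpecialChar(str1):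
--     table = {ord(k): v for k, v in (
--         ("&", "_and"), ("<", "_lessthan_"), (">", "_greaterthan_"),
--         ("-", "_minus_"), ("'", "_prime_"), ("+", "_plus_"), ("*", "_star_"),
--         ("/", "_slash_"), ("(", "_bo_"), (")", "_bc_"),
--         ("[", "_sbo_"), ("]", "_sbc_"), (" ", "_"))}
--     return str1.translate(table).replace("BEL", "&#176")
-- ===== Notes on version B (the rewrite author's own statement) =====
-- stated objective: idiomatic
-- what changed: A runs 14 sequential str.replace passes over the whole string; B builds one translation table and does a single str.translate pass for the 13 single-character keys, followed by the one remaining replace for the three-character key.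
import Mathlib
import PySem

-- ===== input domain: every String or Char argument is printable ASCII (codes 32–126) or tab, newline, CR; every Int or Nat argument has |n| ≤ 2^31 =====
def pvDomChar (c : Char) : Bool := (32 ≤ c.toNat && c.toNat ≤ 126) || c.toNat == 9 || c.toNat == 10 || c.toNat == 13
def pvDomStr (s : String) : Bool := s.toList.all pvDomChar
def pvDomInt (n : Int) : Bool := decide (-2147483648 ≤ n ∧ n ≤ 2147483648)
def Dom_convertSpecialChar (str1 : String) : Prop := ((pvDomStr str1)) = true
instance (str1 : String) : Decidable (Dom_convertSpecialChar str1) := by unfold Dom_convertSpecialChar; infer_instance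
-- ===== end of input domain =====

-- B replaces A's 14 sequential .replace passes by one table-driven pass (str.translate) for the 13
-- single-character keys followed by the single 'BEL' replace; same return value, different traversal.

-- ===== PORT A =====
-- A builds a dict of 14 substitutions and applies str.replace once per entry, in insertion order.
def convertSpecialChar (str1 : String) : String :=
  let d : PySem.Dict String String := PySem.Dict.mk
    [("&", "_and"), ("<", "_lessthan_"), (">", "_greaterthan_"), ("BEL", "&#176"),
     ("-", "_minus_"), ("'", "_prime_"), ("+", "_plus_"), ("*", "_star_"),
     ("/", "_slash_"), ("(", "_bo_"), (")", "_bc_"), ("[", "_sbo_"), ("]", "_sbc_"), (" ", "_")]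
  d.items.foldl (fun s p => PySem.Str.replace s p.1 p.2) str1

-- ===== PORT B =====
-- B's translation table: the 13 single-character substitutions (keyed by the character, as
-- Source B keys its table by ord(c)).
def pvTable : PySem.Dict Char String := PySem.Dict.mk
  [('&', "_and"), ('<', "_lessthan_"), ('>', "_greaterthan_"),
   ('-', "_minus_"), ('\'', "_prime_"), ('+', "_plus_"), ('*', "_star_"),
   ('/', "_slash_"), ('(', "_bo_"), (')', "_bc_"), ('[', "_sbo_"), (']', "_sbc_"), (' ', "_")]

-- str.translate: each character is looked up in the table and replaced by its image,
-- characters missing from the table are kept (ported by hand, exact for this table).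
def pvTranslate (c : Char) : List Char :=
  match PySem.Dict.get? pvTable c with
  | some r => r.toList
  | none => [c]

def convertSpecialChar_alt (str1 : String) : String :=
  PySem.Str.replace (String.ofList (str1.toList.flatMap pvTranslate)) "BEL" "&#176"

-- ===== PRECONDITION & SPEC =====
def Spec_convertSpecialChar (str1 : String) (out : String) : Prop := out = convertSpecialChar_alt str1
instance (str1 : String) (out : String) : Decidable (Spec_convertSpecialChar str1 out) := by unfold Spec_convertSpecialChar; infer_instance

-- ===== CLAIM (what is proved, stated in full; the proofs are below) =====
def Claim_equal_convertSpecialChar : Prop := ∀ (str1 : String), Dom_convertSpecialChar str1 → Spec_convertSpecialChar str1 (convertSpecialChar str1)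

-- ===== LEMMAS AND PROOFS =====

-- One single-character replace pass, per character.
def pvRep (k : Char) (r : List Char) (c : Char) : List Char := if c = k then r else [c]

-- "&#176", the replacement of "BEL".
def pvBel : List Char := ['&', '#', '1', '7', '6']

-- Direct recursion computing replace(s, "BEL", "&#176") (leftmost, non-overlapping).
def pvRepBEL : List Char → List Char
  | [] => []
  | c :: t =>
    if c = 'B' ∧ t.take 2 = ['E', 'L'] then pvBel ++ pvRepBEL (t.drop 2) else c :: pvRepBEL t
  termination_by l => l.length
  decreasing_by all_goals (simp; try omega)

theorem pvRepBEL_cons (c : Char) (t : List Char) :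
    pvRepBEL (c :: t) = if c = 'B' ∧ t.take 2 = ['E', 'L']
      then pvBel ++ pvRepBEL (t.drop 2) else c :: pvRepBEL t := by
  rw [pvRepBEL]

theorem go_single (c0 : Char) (new : List Char) :
    ∀ (fuel : Nat) (l acc : List Char), l.length ≤ fuel →
    PySem.Chars.replace.go [c0] new fuel l acc = acc.reverse ++ l.flatMap (pvRep c0 new) := by
  intro fuel
  induction fuel with
  | zero => intro l acc h; rw [PySem.Chars.replace.go]; simp at h; simp [h]
  | succ n ih =>
    intro l acc h
    match l with
    | [] => rw [PySem.Chars.replace.go] <;> simp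
    | c :: t =>
      rw [PySem.Chars.replace.go]
      by_cases hc : c0 = c
      · rw [if_pos (by simp [List.isPrefixOf, hc])]
        simp only [List.length_cons] at h
        rw [show List.drop [c0].length (c :: t) = t from rfl, ih t _ (by omega)]
        simp [pvRep, hc]
      · rw [if_neg (by simp [List.isPrefixOf, hc]), ih t _ (by simpa using h)]
        simp [pvRep, Ne.symm hc]

theorem replace_single (s : List Char) (c0 : Char) (new : List Char) :
    PySem.Chars.replace s [c0] new = s.flatMap (pvRep c0 new) := by
  rw [PySem.Chars.replace]
  simp [go_single c0 new s.length s [] le_rfl]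

theorem prefixBEL (c : Char) (t : List Char) :
    ['B','E','L'].isPrefixOf (c :: t) = true ↔ (c = 'B' ∧ t.take 2 = ['E','L']) := by
  rw [List.isPrefixOf_iff_prefix, List.cons_prefix_cons]
  match t with
  | [] =>
    constructor
    · rintro ⟨h1, h2⟩; exact absurd (List.prefix_nil.mp h2) (by decide)
    · rintro ⟨h1, h2⟩; exact absurd h2 (by decide)
  | [a] =>
    rw [List.cons_prefix_cons]
    constructor
    · rintro ⟨h1, h2, h3⟩; exact absurd (List.prefix_nil.mp h3) (by decide)
    · rintro ⟨h1, h2⟩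
      have := congrArg List.length h2
      simp at this
  | a :: b :: t' =>
    rw [List.cons_prefix_cons, List.cons_prefix_cons]
    constructor
    · rintro ⟨h1, h2, h3, h4⟩
      refine ⟨h1.symm, ?_⟩
      rw [show List.take 2 (a :: b :: t') = [a, b] from rfl, ← h2, ← h3]
    · rintro ⟨h1, h2⟩
      rw [show List.take 2 (a :: b :: t') = [a, b] from rfl] at h2
      injection h2 with ha h2'
      injection h2' with hb _
      exact ⟨h1.symm, ha.symm, hb.symm, List.nil_prefix⟩

theorem go_BEL :
    ∀ (fuel : Nat) (l acc : List Char), l.length ≤ fuel →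
    PySem.Chars.replace.go ['B','E','L'] pvBel fuel l acc = acc.reverse ++ pvRepBEL l := by
  intro fuel
  induction fuel with
  | zero => intro l acc h; rw [PySem.Chars.replace.go]; simp at h; simp [h, pvRepBEL]
  | succ n ih =>
    intro l acc h
    match l with
    | [] => rw [PySem.Chars.replace.go] <;> simp [pvRepBEL]
    | c :: t =>
      rw [PySem.Chars.replace.go]
      simp only [List.length_cons] at h
      by_cases hc : c = 'B' ∧ t.take 2 = ['E','L']
      · rw [if_pos ((prefixBEL c t).mpr hc)]
        rw [show List.drop (['B','E','L'] : List Char).length (c :: t) = t.drop 2 from rfl]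
        rw [ih (t.drop 2) _ (by simp; omega)]
        rw [pvRepBEL, if_pos hc]
        simp
      · rw [if_neg (fun hp => hc ((prefixBEL c t).mp hp)), ih t _ (by omega)]
        rw [pvRepBEL, if_neg hc]
        simp

theorem replace_BEL (s : List Char) :
    PySem.Chars.replace s ['B','E','L'] pvBel = pvRepBEL s := by
  rw [PySem.Chars.replace]
  simp [go_BEL s.length s [] le_rfl]

-- a block of characters containing no 'B' passes through pvRepBEL unchanged
theorem pvRepBEL_append_of_noB (w : List Char) (hw : 'B' ∉ w) :
    ∀ v, pvRepBEL (w ++ v) = w ++ pvRepBEL v := by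
  induction w with
  | nil => intro v; simp
  | cons x w' ih =>
    intro v
    have hx : x ≠ 'B' := fun h => hw (h ▸ List.mem_cons_self)
    have hw' : 'B' ∉ w' := fun h => hw (List.mem_cons_of_mem _ h)
    rw [List.cons_append, pvRepBEL, if_neg (fun h => hx h.1), ih hw', List.cons_append]

-- inverting one character of a single-substitution pass whose replacement starts with '_'
theorem pvRep_cons_inv (k : Char) (r : List Char) (hr : ∃ w, r = '_' :: w)
    (t : List Char) (d : Char) (t' : List Char) (hd : d ≠ '_')
    (h : t.flatMap (pvRep k r) = d :: t') :
    ∃ t₂, t = d :: t₂ ∧ t₂.flatMap (pvRep k r) = t' := by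
  match t with
  | [] => exact absurd h (by simp)
  | x :: rest =>
    rw [List.flatMap_cons] at h
    by_cases hx : x = k
    · obtain ⟨w, rfl⟩ := hr
      rw [pvRep, if_pos hx] at h
      injection h with h1 _
      exact absurd h1.symm hd
    · rw [pvRep, if_neg hx] at h
      injection h with h1 h2
      exact ⟨rest, by rw [h1], h2⟩

-- a single-character substitution pass (key not in {B,E,L}, replacement '_'-headed without 'B',
-- fixing "&#176") commutes with the BEL pass
theorem pvRepBEL_comm (k : Char) (r : List Char)
    (hkB : k ≠ 'B') (hkE : k ≠ 'E') (hkL : k ≠ 'L')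
    (hr : ∃ w, r = '_' :: w) (hB : 'B' ∉ r)
    (hbel : pvBel.flatMap (pvRep k r) = pvBel) :
    ∀ v, (pvRepBEL v).flatMap (pvRep k r) = pvRepBEL (v.flatMap (pvRep k r)) := by
  have main : ∀ (n : Nat) (v : List Char), v.length ≤ n →
      (pvRepBEL v).flatMap (pvRep k r) = pvRepBEL (v.flatMap (pvRep k r)) := by
    intro n
    induction n with
    | zero =>
      intro v hv
      have : v = [] := List.length_eq_zero_iff.mp (Nat.le_zero.mp hv)
      subst this; simp [pvRepBEL]
    | succ m ih =>
      intro v hv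
      match v with
      | [] => simp [pvRepBEL]
      | c :: t =>
        simp only [List.length_cons] at hv
        by_cases hm : c = 'B' ∧ t.take 2 = ['E','L']
        · obtain ⟨hcB, htake⟩ := hm
          subst hcB
          match t with
          | a :: b :: t₂ =>
            rw [show List.take 2 (a :: b :: t₂) = [a, b] from rfl] at htake
            injection htake with ha htake'
            injection htake' with hb _
            subst ha; subst hb
            rw [pvRepBEL, if_pos (by exact ⟨rfl, rfl⟩)]
            rw [show List.drop 2 ('E' :: 'L' :: t₂) = t₂ from rfl]
            rw [List.flatMap_append, hbel]
            rw [List.flatMap_cons, List.flatMap_cons, List.flatMap_cons]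
            rw [show pvRep k r 'B' = ['B'] from by rw [pvRep, if_neg (fun h => hkB h.symm)]]
            rw [show pvRep k r 'E' = ['E'] from by rw [pvRep, if_neg (fun h => hkE h.symm)]]
            rw [show pvRep k r 'L' = ['L'] from by rw [pvRep, if_neg (fun h => hkL h.symm)]]
            rw [show (['B'] : List Char) ++ (['E'] ++ (['L'] ++ List.flatMap (pvRep k r) t₂))
                  = 'B' :: 'E' :: 'L' :: List.flatMap (pvRep k r) t₂ from rfl]
            rw [pvRepBEL, if_pos (by exact ⟨rfl, rfl⟩)]
            rw [show List.drop 2 ('E' :: 'L' :: List.flatMap (pvRep k r) t₂)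
                  = List.flatMap (pvRep k r) t₂ from rfl]
            rw [ih t₂ (by simp at hv; omega)]
          | [] => exact absurd htake (by decide)
          | [a] => exact absurd (congrArg List.length htake) (by simp)
        · rw [pvRepBEL, if_neg hm, List.flatMap_cons, List.flatMap_cons]
          rw [ih t (by omega)]
          by_cases hck : c = k
          · obtain ⟨w, hrw⟩ := hr
            have hBw : 'B' ∉ pvRep k r c := by rw [pvRep, if_pos hck]; exact hB
            rw [pvRepBEL_append_of_noB _ hBw]
          · rw [show pvRep k r c = [c] from by rw [pvRep, if_neg hck]]
            rw [show ([c] : List Char) ++ List.flatMap (pvRep k r) t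
                  = c :: List.flatMap (pvRep k r) t from rfl]
            have hneg : ¬(c = 'B' ∧ (List.flatMap (pvRep k r) t).take 2 = ['E', 'L']) := by
              intro ⟨hcB, htake⟩
              match hfm : List.flatMap (pvRep k r) t with
              | [] => rw [hfm] at htake; exact absurd htake (by decide)
              | [a] => rw [hfm] at htake
                       exact absurd (congrArg List.length htake) (by simp)
              | a :: b :: v' =>
                rw [hfm] at htake
                rw [show List.take 2 (a :: b :: v') = [a, b] from rfl] at htake
                injection htake with ha htake'
                injection htake' with hb _
                subst ha; subst hb
                obtain ⟨t₂, ht, h2⟩ := pvRep_cons_inv k r hr t 'E' ('L' :: v') (by decide) hfm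
                obtain ⟨t₃, ht₂, _⟩ := pvRep_cons_inv k r hr t₂ 'L' v' (by decide) h2
                exact hm ⟨hcB, by rw [ht, ht₂]; rfl⟩
            rw [pvRepBEL_cons, if_neg hneg, List.singleton_append]
  exact fun v => main v.length v le_rfl

-- the 13 single-character passes, in A's order, as one composed function
def pvChain13 (l : List Char) : List Char :=
  ((((((((((((l.flatMap (pvRep '&' "_and".toList)).flatMap
    (pvRep '<' "_lessthan_".toList)).flatMap
    (pvRep '>' "_greaterthan_".toList)).flatMap
    (pvRep '-' "_minus_".toList)).flatMap
    (pvRep '\'' "_prime_".toList)).flatMap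
    (pvRep '+' "_plus_".toList)).flatMap
    (pvRep '*' "_star_".toList)).flatMap
    (pvRep '/' "_slash_".toList)).flatMap
    (pvRep '(' "_bo_".toList)).flatMap
    (pvRep ')' "_bc_".toList)).flatMap
    (pvRep '[' "_sbo_".toList)).flatMap
    (pvRep ']' "_sbc_".toList)).flatMap
    (pvRep ' ' "_".toList)

theorem pvChain13_append (a b : List Char) :
    pvChain13 (a ++ b) = pvChain13 a ++ pvChain13 b := by
  simp only [pvChain13, List.flatMap_append]

theorem pvChain13_single (c : Char) : pvChain13 [c] = pvTranslate c := by
  by_cases h1 : c = '&';  · subst h1; decide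
  by_cases h2 : c = '<';  · subst h2; decide
  by_cases h3 : c = '>';  · subst h3; decide
  by_cases h4 : c = '-';  · subst h4; decide
  by_cases h5 : c = '\''; · subst h5; decide
  by_cases h6 : c = '+';  · subst h6; decide
  by_cases h7 : c = '*';  · subst h7; decide
  by_cases h8 : c = '/';  · subst h8; decide
  by_cases h9 : c = '(';  · subst h9; decide
  by_cases h10 : c = ')'; · subst h10; decide
  by_cases h11 : c = '['; · subst h11; decide
  by_cases h12 : c = ']'; · subst h12; decide
  by_cases h13 : c = ' '; · subst h13; decide
  rw [show pvTranslate c = [c] from ?_]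
  · simp only [pvChain13, List.flatMap_singleton, pvRep,
      if_neg h1, if_neg h2, if_neg h3, if_neg h4, if_neg h5, if_neg h6, if_neg h7,
      if_neg h8, if_neg h9, if_neg h10, if_neg h11, if_neg h12, if_neg h13]
  · rw [pvTranslate]
    rw [show PySem.Dict.get? pvTable c = none from ?_]
    simp [PySem.Dict.get?, pvTable]
    exact ⟨Ne.symm h1, Ne.symm h2, Ne.symm h3, Ne.symm h4, Ne.symm h5, Ne.symm h6,
      Ne.symm h7, Ne.symm h8, Ne.symm h9, Ne.symm h10, Ne.symm h11, Ne.symm h12, Ne.symm h13⟩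

theorem pvChain13_eq_translate (u : List Char) :
    pvChain13 u = u.flatMap pvTranslate := by
  induction u with
  | nil => simp [pvChain13]
  | cons c u' ih =>
    rw [show c :: u' = [c] ++ u' from rfl, pvChain13_append, pvChain13_single, ih,
      List.flatMap_append, List.flatMap_singleton]

theorem B_chars (s : String) : (convertSpecialChar_alt s).toList
    = pvRepBEL (s.toList.flatMap pvTranslate) := by
  rw [convertSpecialChar_alt, PySem.Str.toList_replace]
  rw [show ("BEL" : String).toList = ['B','E','L'] from rfl,
      show ("&#176" : String).toList = pvBel from rfl]
  rw [replace_BEL]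
  simp

theorem A_chars (s : String) : (convertSpecialChar s).toList
    = pvRepBEL (pvChain13 s.toList) := by
  simp only [convertSpecialChar, List.foldl_cons, List.foldl_nil]
  simp only [PySem.Str.toList_replace]
  rw [show ("&" : String).toList = ['&'] from rfl,
      show ("<" : String).toList = ['<'] from rfl,
      show (">" : String).toList = ['>'] from rfl,
      show ("BEL" : String).toList = ['B','E','L'] from rfl,
      show ("&#176" : String).toList = pvBel from rfl,
      show ("-" : String).toList = ['-'] from rfl,
      show ("'" : String).toList = ['\''] from rfl,
      show ("+" : String).toList = ['+'] from rfl,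
      show ("*" : String).toList = ['*'] from rfl,
      show ("/" : String).toList = ['/'] from rfl,
      show ("(" : String).toList = ['('] from rfl,
      show (")" : String).toList = [')'] from rfl,
      show ("[" : String).toList = ['['] from rfl,
      show ("]" : String).toList = [']'] from rfl,
      show (" " : String).toList = [' '] from rfl]
  simp only [replace_single, replace_BEL]
  rw [pvRepBEL_comm '-' "_minus_".toList (by decide) (by decide) (by decide)
        ⟨"minus_".toList, rfl⟩ (by decide) (by decide),
      pvRepBEL_comm '\'' "_prime_".toList (by decide) (by decide) (by decide)
        ⟨"prime_".toList, rfl⟩ (by decide) (by decide),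
      pvRepBEL_comm '+' "_plus_".toList (by decide) (by decide) (by decide)
        ⟨"plus_".toList, rfl⟩ (by decide) (by decide),
      pvRepBEL_comm '*' "_star_".toList (by decide) (by decide) (by decide)
        ⟨"star_".toList, rfl⟩ (by decide) (by decide),
      pvRepBEL_comm '/' "_slash_".toList (by decide) (by decide) (by decide)
        ⟨"slash_".toList, rfl⟩ (by decide) (by decide),
      pvRepBEL_comm '(' "_bo_".toList (by decide) (by decide) (by decide)
        ⟨"bo_".toList, rfl⟩ (by decide) (by decide),
      pvRepBEL_comm ')' "_bc_".toList (by decide) (by decide) (by decide)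
        ⟨"bc_".toList, rfl⟩ (by decide) (by decide),
      pvRepBEL_comm '[' "_sbo_".toList (by decide) (by decide) (by decide)
        ⟨"sbo_".toList, rfl⟩ (by decide) (by decide),
      pvRepBEL_comm ']' "_sbc_".toList (by decide) (by decide) (by decide)
        ⟨"sbc_".toList, rfl⟩ (by decide) (by decide),
      pvRepBEL_comm ' ' "_".toList (by decide) (by decide) (by decide)
        ⟨[], rfl⟩ (by decide) (by decide)]
  rw [show (pvChain13 s.toList) = (((((((((((((s.toList.flatMap (pvRep '&' "_and".toList)).flatMap
    (pvRep '<' "_lessthan_".toList)).flatMap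
    (pvRep '>' "_greaterthan_".toList)).flatMap
    (pvRep '-' "_minus_".toList)).flatMap
    (pvRep '\'' "_prime_".toList)).flatMap
    (pvRep '+' "_plus_".toList)).flatMap
    (pvRep '*' "_star_".toList)).flatMap
    (pvRep '/' "_slash_".toList)).flatMap
    (pvRep '(' "_bo_".toList)).flatMap
    (pvRep ')' "_bc_".toList)).flatMap
    (pvRep '[' "_sbo_".toList)).flatMap
    (pvRep ']' "_sbc_".toList)).flatMap
    (pvRep ' ' "_".toList)) from rfl]

-- ===== VERDICT (by name: the statement is the Claim_ definition above) =====
theorem convertSpecialChar_spec : Claim_equal_convertSpecialChar := by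
  intro str1 _
  unfold Spec_convertSpecialChar
  rw [← String.toList_inj, A_chars, B_chars, pvChain13_eq_translate]
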